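-- pv_equiv track=rewrite | github.com/steffichoi/scheduler | scheduler_testing.py | compose_initial_schedule
-- ===== SOURCE A (Python) =====
-- def compose_initial_schedule(days, hours, spacing = 1):
--     schedule = []
--     L_or_B_or_N = 0
--     spaces = 0
--     for i in range(days):
--         day = []
--         for j in range(hours):
--             if(L_or_B_or_N  == 0):
--                 day.append('L')
--                 L_or_B_or_N = 1
--             elif(L_or_B_or_N  == 1):
--                 day.append('B')
--                 L_or_B_or_N = 2
--                 spaces = 0
--             else:
--                 day.append(None)
--                 if(spaces < spacing):
--                     spaces = spaces + 1
--                     L_or_B_or_N = 2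
--                 else:
--                     L_or_B_or_N = 0
--         schedule.append(day)
--     return schedule
-- ===== SOURCE B (Python) =====
-- def compose_initial_schedule(days, hours, spacing=1):
--     # Closed form: the flat cell sequence is periodic with period
--     # 'L','B' followed by max(1, spacing+1) Nones, running across day boundaries.
--     p = 2 + max(1, spacing + 1)
--     return [[('L' if (i * hours + j) % p == 0 else
--               'B' if (i * hours + j) % p == 1 else None)
--              for j in range(hours)]
--             for i in range(days)]
-- ===== Notes on version B (the rewrite author's own statement) =====
-- stated objective: simpler
-- what changed: Replaced A's stateful L/B/None state machine threaded across nested loops by a closed-form rule: the flat cell sequence is periodic with period 2 + max(1, spacing+1), so cell (i,j) is computed directly from (i*hours + j) mod that period, eliminating all mutable state.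
import Mathlib
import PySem

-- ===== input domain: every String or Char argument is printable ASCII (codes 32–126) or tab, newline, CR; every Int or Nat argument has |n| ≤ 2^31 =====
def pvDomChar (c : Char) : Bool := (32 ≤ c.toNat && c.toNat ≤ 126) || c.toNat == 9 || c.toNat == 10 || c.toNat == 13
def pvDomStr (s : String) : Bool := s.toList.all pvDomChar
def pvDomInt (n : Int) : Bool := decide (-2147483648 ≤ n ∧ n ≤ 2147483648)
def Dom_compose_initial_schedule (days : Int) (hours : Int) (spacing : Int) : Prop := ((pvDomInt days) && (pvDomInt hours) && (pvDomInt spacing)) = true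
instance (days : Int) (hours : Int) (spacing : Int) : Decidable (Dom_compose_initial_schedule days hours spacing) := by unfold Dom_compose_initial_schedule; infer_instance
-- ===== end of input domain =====

-- B replaces A's mutable state machine by a closed-form periodic-index rule; objective: simpler.

-- ===== PORT A =====
-- one iteration of A's inner loop body (same branches, same order)
def pvStepA (spacing : Int) (st : List (Option String) × Int × Int) : List (Option String) × Int × Int :=
  match st with
  | (day, s, spaces) =>
    if s == 0 then (day ++ [some "L"], 1, spaces)
    else if s == 1 then (day ++ [some "B"], 2, 0)
    else if spaces < spacing then (day ++ [none], 2, spaces + 1)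
    else (day ++ [none], 0, spaces)

def compose_initial_schedule (days : Int) (hours : Int) (spacing : Int) : List (List (Option String)) :=
  let r := (PySem.List.pyRange 0 days 1).foldl
    (fun (acc : List (List (Option String)) × Int × Int) _ =>
      let inner := (PySem.List.pyRange 0 hours 1).foldl (fun st _ => pvStepA spacing st)
        (([] : List (Option String)), acc.2.1, acc.2.2)
      (acc.1 ++ [inner.1], inner.2.1, inner.2.2))
    (([] : List (List (Option String))), (0 : Int), (0 : Int))
  r.1

-- ===== PORT B =====
def pvCell (p t : Int) : Option String :=
  if PySem.Int.mod t p == 0 then some "L"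
  else if PySem.Int.mod t p == 1 then some "B"
  else none

def compose_initial_schedule_alt (days : Int) (hours : Int) (spacing : Int) : List (List (Option String)) :=
  let p := 2 + max 1 (spacing + 1)
  (PySem.List.pyRange 0 days 1).map (fun i =>
    (PySem.List.pyRange 0 hours 1).map (fun j => pvCell p (i * hours + j)))

-- ===== PRECONDITION & SPEC =====
def Spec_compose_initial_schedule (days : Int) (hours : Int) (spacing : Int) (out : List (List (Option String))) : Prop := out = compose_initial_schedule_alt days hours spacing
instance (days : Int) (hours : Int) (spacing : Int) (out : List (List (Option String))) : Decidable (Spec_compose_initial_schedule days hours spacing out) := by unfold Spec_compose_initial_schedule; infer_instance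

-- ===== CLAIM (what is proved, stated in full; the proofs are below) =====
def Claim_equal_compose_initial_schedule : Prop := ∀ (days : Int) (hours : Int) (spacing : Int), Dom_compose_initial_schedule days hours spacing → Spec_compose_initial_schedule days hours spacing (compose_initial_schedule days hours spacing)

-- ===== LEMMAS AND PROOFS =====

-- the loop invariant: the machine state (s, spaces) before emitting cell number t
-- is determined by t mod p (p = the period 2 + max 1 (spacing+1))
def pvInv (p t s spaces : Int) : Prop :=
  (t % p = 0 ∧ s = 0) ∨ (t % p = 1 ∧ s = 1) ∨ (2 ≤ t % p ∧ s = 2 ∧ spaces = t % p - 2)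

lemma pvCell_eq (p t : Int) (hp : 0 < p) :
    pvCell p t = (if t % p = 0 then some "L" else if t % p = 1 then some "B" else none) := by
  simp [pvCell, PySem.Int.mod_eq_emod_of_pos hp]

lemma pvEmod_succ_eq (t p : Int) (hp3 : 3 ≤ p) (h : t % p = p - 1) : (t + 1) % p = 0 := by
  rw [Int.add_emod t 1 p, Int.emod_eq_of_lt (a := 1) (by omega) (by omega), h]
  simp

lemma pvEmod_succ_lt (t p : Int) (hp3 : 3 ≤ p) (h : t % p < p - 1) : (t + 1) % p = t % p + 1 := by
  have h0 : 0 ≤ t % p := Int.emod_nonneg t (by omega)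
  rw [Int.add_emod t 1 p, Int.emod_eq_of_lt (a := 1) (by omega) (by omega)]
  exact Int.emod_eq_of_lt (by omega) (by omega)

lemma pvStepA_spec (spacing : Int) (t : Int)
    (day : List (Option String)) (s spaces : Int)
    (hInv : pvInv (2 + max 1 (spacing + 1)) t s spaces) :
    ∃ s' spaces', pvStepA spacing (day, s, spaces)
      = (day ++ [pvCell (2 + max 1 (spacing + 1)) t], s', spaces')
      ∧ pvInv (2 + max 1 (spacing + 1)) (t + 1) s' spaces' := by
  have hM1 : (1 : Int) ≤ max 1 (spacing + 1) := le_max_left _ _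
  have hM2 : spacing + 1 ≤ max 1 (spacing + 1) := le_max_right _ _
  have hMc : max 1 (spacing + 1) = 1 ∨ max 1 (spacing + 1) = spacing + 1 := max_choice _ _
  set p := 2 + max 1 (spacing + 1) with hpdef
  have hp : 0 < p := by omega
  have hp3 : 3 ≤ p := by omega
  have h0 : 0 ≤ t % p := Int.emod_nonneg t (by omega)
  have h1 : t % p < p := Int.emod_lt_of_pos t hp
  rcases hInv with ⟨he, rfl⟩ | ⟨he, rfl⟩ | ⟨he, rfl, hsp⟩
  · refine ⟨1, spaces, ?_, Or.inr (Or.inl ⟨?_, rfl⟩)⟩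
    · simp [pvStepA, pvCell_eq _ _ hp, he]
    · rw [pvEmod_succ_lt t p hp3 (by omega)]; omega
  · refine ⟨2, 0, ?_, Or.inr (Or.inr ⟨?_, rfl, ?_⟩)⟩
    · simp [pvStepA, pvCell_eq _ _ hp, he]
    · rw [pvEmod_succ_lt t p hp3 (by omega)]; omega
    · rw [pvEmod_succ_lt t p hp3 (by omega)]; omega
  · by_cases hbr : spaces < spacing
    · have hlt : t % p < p - 1 := by omega
      refine ⟨2, spaces + 1, ?_, Or.inr (Or.inr ⟨?_, rfl, ?_⟩)⟩
      · simp [pvStepA, pvCell_eq _ _ hp, hbr, show t % p ≠ 0 by omega, show t % p ≠ 1 by omega]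
      · rw [pvEmod_succ_lt t p hp3 hlt]; omega
      · rw [pvEmod_succ_lt t p hp3 hlt]; omega
    · have heq : t % p = p - 1 := by omega
      refine ⟨0, spaces, ?_, Or.inl ⟨?_, rfl⟩⟩
      · simp [pvStepA, pvCell_eq _ _ hp, hbr, show t % p ≠ 0 by omega, show t % p ≠ 1 by omega]
      · rw [pvEmod_succ_eq t p hp3 heq]

lemma pvFold_inner (spacing : Int) {α : Type} (l : List α) (t : Int)
    (day : List (Option String)) (s spaces : Int)
    (hInv : pvInv (2 + max 1 (spacing + 1)) t s spaces) :
    ∃ s' spaces',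
      l.foldl (fun st _ => pvStepA spacing st) (day, s, spaces)
        = (day ++ (List.range l.length).map (fun (k : ℕ) => pvCell (2 + max 1 (spacing + 1)) (t + (k : Int))), s', spaces')
      ∧ pvInv (2 + max 1 (spacing + 1)) (t + (l.length : Int)) s' spaces' := by
  induction l generalizing t day s spaces with
  | nil => exact ⟨s, spaces, by simp, by simpa using hInv⟩
  | cons a l ih =>
    obtain ⟨s1, sp1, hstep, hinv1⟩ := pvStepA_spec spacing t day s spaces hInv
    obtain ⟨s', sp', hfold, hinv'⟩ := ih (t + 1) (day ++ [pvCell (2 + max 1 (spacing + 1)) t]) s1 sp1 hinv1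
    refine ⟨s', sp', ?_, ?_⟩
    · rw [List.foldl_cons, hstep, hfold, List.append_assoc]
      congr 1
      rw [List.length_cons, List.range_succ_eq_map, List.map_cons, List.map_map]
      simp only [Nat.cast_zero, add_zero, List.singleton_append]
      congr 1
      congr 1
      apply List.map_congr_left
      intro k _
      simp only [Function.comp_apply]
      congr 1
      push_cast
      ring
    · have h : t + ((a :: l).length : Int) = t + 1 + (l.length : Int) := by
        rw [List.length_cons]; push_cast; ring
      rw [h]; exact hinv'

-- one row of B's schedule, as produced for row index i
def pvRowB (spacing hours : Int) (i : ℕ) : List (Option String) :=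
  (List.range hours.toNat).map (fun (k : ℕ) => pvCell (2 + max 1 (spacing + 1)) ((i : Int) * hours + (k : Int)))

lemma pvFold_outer (spacing hours : Int) {α : Type} (l : List α) (m : ℕ)
    (sched : List (List (Option String))) (s spaces : Int)
    (hInv : pvInv (2 + max 1 (spacing + 1)) ((m * hours.toNat : ℕ) : Int) s spaces) :
    ∃ s' spaces',
      l.foldl
        (fun (acc : List (List (Option String)) × Int × Int) _ =>
          let inner := (PySem.List.pyRange 0 hours 1).foldl (fun st _ => pvStepA spacing st)
            (([] : List (Option String)), acc.2.1, acc.2.2)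
          (acc.1 ++ [inner.1], inner.2.1, inner.2.2)) (sched, s, spaces)
        = (sched ++ (List.range l.length).map (fun r => pvRowB spacing hours (m + r)), s', spaces')
      ∧ pvInv (2 + max 1 (spacing + 1)) (((m + l.length) * hours.toNat : ℕ) : Int) s' spaces' := by
  induction l generalizing m sched s spaces with
  | nil => exact ⟨s, spaces, by simp, by simpa using hInv⟩
  | cons a l ih =>
    obtain ⟨s1, sp1, hstep, hinv1⟩ :=
      pvFold_inner spacing (PySem.List.pyRange 0 hours 1) ((m * hours.toNat : ℕ) : Int) [] s spaces hInv
    have hlen : (PySem.List.pyRange 0 hours 1).length = hours.toNat := by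
      rw [PySem.List.length_pyRange_one]; simp
    have hrow : (List.range (PySem.List.pyRange 0 hours 1).length).map
        (fun (k : ℕ) => pvCell (2 + max 1 (spacing + 1)) (((m * hours.toNat : ℕ) : Int) + (k : Int)))
        = pvRowB spacing hours m := by
      rw [hlen]
      unfold pvRowB
      apply List.map_congr_left
      intro k hk
      have hk' : k < hours.toNat := List.mem_range.mp hk
      have hpos : 0 < hours := by omega
      congr 1
      push_cast [Int.toNat_of_nonneg (le_of_lt hpos)]
      ring
    have hinv1' : pvInv (2 + max 1 (spacing + 1)) (((m + 1) * hours.toNat : ℕ) : Int) s1 sp1 := by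
      have h : ((((m + 1) * hours.toNat : ℕ)) : Int)
          = ((m * hours.toNat : ℕ) : Int) + ((PySem.List.pyRange 0 hours 1).length : Int) := by
        rw [hlen]; push_cast; ring
      rw [h]; exact hinv1
    obtain ⟨s', sp', hfold, hinv'⟩ := ih (m + 1) (sched ++ [pvRowB spacing hours m]) s1 sp1 hinv1'
    refine ⟨s', sp', ?_, ?_⟩
    · rw [List.foldl_cons]
      simp only []
      rw [hstep]
      simp only [List.nil_append]
      rw [hrow, hfold, List.append_assoc]
      congr 1
      rw [List.length_cons, List.range_succ_eq_map, List.map_cons, List.map_map]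
      simp only [Nat.add_zero, List.singleton_append]
      congr 1
      congr 1
      apply List.map_congr_left
      intro k _
      simp only [Function.comp_apply]
      congr 1
      omega
    · have h : (m + (a :: l).length) * hours.toNat = (m + 1 + l.length) * hours.toNat := by
        rw [List.length_cons]; ring
      rw [h]; exact hinv'

-- ===== VERDICT (by name: the statement is the Claim_ definition above) =====
theorem compose_initial_schedule_spec : Claim_equal_compose_initial_schedule := by
  intro days hours spacing _
  unfold Spec_compose_initial_schedule compose_initial_schedule compose_initial_schedule_alt
  have hInv0 : pvInv (2 + max 1 (spacing + 1)) (((0 * hours.toNat : ℕ) : Int)) 0 0 := by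
    exact Or.inl ⟨by simp, rfl⟩
  obtain ⟨s', sp', hfold, _⟩ :=
    pvFold_outer spacing hours (PySem.List.pyRange 0 days 1) 0 [] 0 0 hInv0
  rw [hfold]
  simp only [List.nil_append]
  rw [PySem.List.length_pyRange_one, PySem.List.pyRange_one 0 days]
  simp only [sub_zero, List.map_map]
  apply List.map_congr_left
  intro r _
  simp only [Function.comp_apply, zero_add]
  unfold pvRowB
  rw [PySem.List.pyRange_one 0 hours]
  simp only [sub_zero, List.map_map]
  apply List.map_congr_left
  intro k _
  simp only [Function.comp_apply, zero_add]
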